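-- pv_equiv track=rewrite | github.com/Capstone-Projects-2021-Spring/project-tap-tune | models/analysis/beat_match_improve_dev.py | bin_to_frame
-- ===== SOURCE A (Python) =====
-- def bin_to_frame(bin_array):
--     res_frames = []
--     track = 0
--     offset = 0
--     check = 0
--
--     for bin in bin_array:
--         if (bin == 0) and (check != len(bin_array) - 1):
--             track += 1
--
--         elif (bin == 1):
--             res_frames.append(track + offset)
--             offset += 1
--
--         else:
--             res_frames.append(track + offset + 1)
--             offset += 1
--         check += 1
--     return res_frames
-- ===== SOURCE B (Python) =====
-- def bin_to_frame(bin_array):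
--     n = len(bin_array)
--     dropped = {i for i, b in enumerate(bin_array) if b == 0 and i != n - 1}
--     bumped = {i for i, b in enumerate(bin_array) if b != 1}
--     return [i + 1 if i in bumped else i for i in range(n) if i not in dropped]
-- ===== Notes on version B (the rewrite author's own statement) =====
-- stated objective: alternative
-- what changed: Replaced A's single pass threading three running counters (track/offset/check) by a staged set-based algorithm: two precomputed index sets (indices dropped, indices emitted shifted by one) and a final loop over range(n) that decides each index by set membership.
import Mathlib
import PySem

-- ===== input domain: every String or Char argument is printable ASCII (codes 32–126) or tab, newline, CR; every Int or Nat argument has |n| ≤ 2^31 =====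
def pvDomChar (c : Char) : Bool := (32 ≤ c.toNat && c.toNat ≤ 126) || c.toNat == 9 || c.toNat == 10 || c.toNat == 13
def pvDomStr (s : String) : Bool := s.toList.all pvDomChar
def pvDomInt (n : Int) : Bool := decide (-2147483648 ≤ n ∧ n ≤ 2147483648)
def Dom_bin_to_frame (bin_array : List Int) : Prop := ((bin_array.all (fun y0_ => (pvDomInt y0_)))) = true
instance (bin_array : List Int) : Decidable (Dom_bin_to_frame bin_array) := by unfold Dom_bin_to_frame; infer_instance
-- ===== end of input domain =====

-- B replaces A's counter-threading single pass by a staged set-based algorithm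
-- (two precomputed index sets, then a range loop with membership tests); alternative decomposition.

-- ===== PORT A =====
-- the for-loop of A: state = (res_frames, track, offset, check), n = len(bin_array)
def binToFrameLoop (n : Int) : List Int → List Int → Int → Int → Int → List Int
  | [], res, _, _, _ => res
  | b :: rest, res, track, offset, check =>
    if b = 0 ∧ check ≠ n - 1 then
      binToFrameLoop n rest res (track + 1) offset (check + 1)
    else if b = 1 then
      binToFrameLoop n rest (res ++ [track + offset]) track (offset + 1) (check + 1)
    else
      binToFrameLoop n rest (res ++ [track + offset + 1]) track (offset + 1) (check + 1)

def bin_to_frame (bin_array : List Int) : List Int :=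
  binToFrameLoop (bin_array.length : Int) bin_array [] 0 0 0

-- ===== PORT B =====
-- dropped = {i for i, b in enumerate(bin_array) if b == 0 and i != n - 1}
def binDropped (n : Int) (bin_array : List Int) : PySem.Set Int :=
  PySem.Set.ofList (((PySem.List.enumerate bin_array).filter
    (fun p => p.2 == 0 && !(p.1 == n - 1))).map (·.1))

-- bumped = {i for i, b in enumerate(bin_array) if b != 1}
def binBumped (bin_array : List Int) : PySem.Set Int :=
  PySem.Set.ofList (((PySem.List.enumerate bin_array).filter
    (fun p => !(p.2 == 1))).map (·.1))

-- [i + 1 if i in bumped else i for i in range(n) if i not in dropped]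
def bin_to_frame_alt (bin_array : List Int) : List Int :=
  let n : Int := bin_array.length
  let dropped := binDropped n bin_array
  let bumped := binBumped bin_array
  (PySem.List.pyRange 0 n 1).foldl
    (fun acc i =>
      if PySem.Set.contains dropped i then acc
      else acc ++ [if PySem.Set.contains bumped i then i + 1 else i]) []

-- ===== PRECONDITION & SPEC =====
def Spec_bin_to_frame (bin_array : List Int) (out : List Int) : Prop := out = bin_to_frame_alt bin_array
instance (bin_array : List Int) (out : List Int) : Decidable (Spec_bin_to_frame bin_array out) := by unfold Spec_bin_to_frame; infer_instance

-- ===== CLAIM (what is proved, stated in full; the proofs are below) =====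
def Claim_equal_bin_to_frame : Prop := ∀ (bin_array : List Int), Dom_bin_to_frame bin_array → Spec_bin_to_frame bin_array (bin_to_frame bin_array)

-- ===== LEMMAS AND PROOFS =====

-- proof-side middle form: per-index mapping over the list with running index i
def frameGo (n : Int) (i : Int) : List Int → List Int
  | [] => []
  | b :: rest =>
    (if b ≠ 0 ∨ i = n - 1 then [if b = 1 then i else i + 1] else []) ++ frameGo n (i + 1) rest

-- membership in a set comprehension over enumerate keeping the index
theorem mem_idxSet (xs : List Int) (f : Int × Int → Bool) (k : Nat) (hk : k < xs.length) :
    ((k : Int) ∈ PySem.Set.ofList (((PySem.List.enumerate xs).filter f).map (·.1)))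
      ↔ f ((k : Int), xs[k]) = true := by
  simp only [PySem.Set.mem_ofList, List.mem_map, List.mem_filter,
    PySem.List.mem_enumerate_iff]
  constructor
  · rintro ⟨p, ⟨⟨j, hj, rfl⟩, hf⟩, hfst⟩
    simp only [zero_add] at hf hfst
    have : j = k := by exact_mod_cast hfst
    subst this; exact hf
  · intro hf
    exact ⟨((k : Int), xs[k]), ⟨⟨k, hk, by simp⟩, hf⟩, rfl⟩

theorem binToFrameLoop_eq (xs : List Int) :
    ∀ (n : Int) (res : List Int) (track offset check : Int),
      track + offset = check → n = check + (xs.length : Int) →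
      binToFrameLoop n xs res track offset check = res ++ frameGo n check xs := by
  induction xs with
  | nil => intro n res t o c _ _; simp [binToFrameLoop, frameGo]
  | cons b rest ih =>
    intro n res t o c hto hn
    simp only [List.length_cons] at hn
    by_cases hb0 : b = 0
    · by_cases hc : c = n - 1
      · have hrest : rest = [] := by
          have : (rest.length : Int) = 0 := by omega
          simpa using this
        subst hrest
        simp [binToFrameLoop, frameGo, hb0, hc, hto]
      · have : binToFrameLoop n (b :: rest) res t o c
            = binToFrameLoop n rest res (t + 1) o (c + 1) := by
          simp [binToFrameLoop, hb0, hc]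
        rw [this, ih n res (t + 1) o (c + 1) (by omega) (by omega)]
        simp [frameGo, hb0, hc]
    · by_cases hb1 : b = 1
      · have : binToFrameLoop n (b :: rest) res t o c
            = binToFrameLoop n rest (res ++ [t + o]) t (o + 1) (c + 1) := by
          simp [binToFrameLoop, hb1]
        rw [this, ih n (res ++ [t + o]) t (o + 1) (c + 1) (by omega) (by omega)]
        simp [frameGo, hb1, hto]
      · have : binToFrameLoop n (b :: rest) res t o c
            = binToFrameLoop n rest (res ++ [t + o + 1]) t (o + 1) (c + 1) := by
          simp [binToFrameLoop, hb0, hb1]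
        rw [this, ih n (res ++ [t + o + 1]) t (o + 1) (c + 1) (by omega) (by omega)]
        simp [frameGo, hb0, hb1, hto]

-- B's range fold equals the middle form, from index k on
theorem binAlt_fold_eq (xs : List Int) :
    ∀ (m k : Nat), k + m = xs.length → ∀ (acc : List Int),
      (PySem.List.pyRange (k : Int) (xs.length : Int) 1).foldl
        (fun acc i =>
          if PySem.Set.contains (binDropped (xs.length : Int) xs) i then acc
          else acc ++ [if PySem.Set.contains (binBumped xs) i then i + 1 else i]) acc
      = acc ++ frameGo (xs.length : Int) (k : Int) (xs.drop k) := by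
  intro m
  induction m with
  | zero =>
    intro k hk acc
    have hkl : k = xs.length := by omega
    subst hkl
    rw [PySem.List.pyRange_one_eq_nil (by omega)]
    simp [List.drop_length, frameGo]
  | succ m ih =>
    intro k hk acc
    have hklt : k < xs.length := by omega
    have hdrop : xs.drop k = xs[k] :: xs.drop (k + 1) :=
      List.drop_eq_getElem_cons hklt
    have hdmem : ((k : Int) ∈ binDropped (xs.length : Int) xs)
        ↔ (xs[k] = 0 ∧ ¬((k : Int) = (xs.length : Int) - 1)) := by
      simp only [binDropped]
      rw [mem_idxSet xs _ k hklt]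
      simp
    have hbmem : ((k : Int) ∈ binBumped xs) ↔ ¬(xs[k] = 1) := by
      simp only [binBumped]
      rw [mem_idxSet xs _ k hklt]
      simp
    rw [PySem.List.pyRange_one_cons (by exact_mod_cast hklt), List.foldl_cons]
    rw [hdrop]
    simp only [frameGo, PySem.Set.contains_iff]
    simp only [PySem.Set.contains_iff] at ih
    rw [show ((k : Int) + 1) = ((k + 1 : Nat) : Int) by push_cast; ring]
    rw [ih (k + 1) (by omega)]
    by_cases h0 : xs[k] = (0 : Int)
    · by_cases hlast : (k : Int) = (xs.length : Int) - 1
      · rw [if_neg (by rw [hdmem]; tauto), if_pos (hbmem.mpr (by simp [h0]))]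
        simp [h0, hlast]
      · rw [if_pos (hdmem.mpr ⟨h0, hlast⟩)]
        simp [h0, hlast]
    · rw [if_neg (by rw [hdmem]; tauto)]
      by_cases h1 : xs[k] = (1 : Int)
      · rw [if_neg (by rw [hbmem]; tauto)]
        simp [h1]
      · rw [if_pos (hbmem.mpr h1)]
        simp [h0, h1]

-- ===== VERDICT (by name: the statement is the Claim_ definition above) =====
theorem bin_to_frame_spec : Claim_equal_bin_to_frame := by
  intro xs _
  unfold Spec_bin_to_frame bin_to_frame bin_to_frame_alt
  rw [binToFrameLoop_eq xs (xs.length : Int) [] 0 0 0 (by omega) (by omega)]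
  have := binAlt_fold_eq xs xs.length 0 (by omega) []
  simpa using this.symm
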